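-- pv_equiv track=rewrite | github.com/kevinmcmahon/quality-playbook | bin/skill_derivation/sections.py | _iter_top_level_headings
-- ===== SOURCE A (Python) =====
-- from typing import Iterator, List, Optional
--
-- def _iter_top_level_headings(text: str) -> Iterator[tuple]:
--     """Yield (line_idx_0based, heading_level, heading_text) for top-level
--     `##` and `###` headings, skipping anything inside a fenced code block.
--
--     line_idx is 0-based for internal slicing convenience; callers
--     convert to 1-based when populating the Section dataclass.
--     """
--     in_fence = False
--     fence_marker: Optional[str] = None
--     lines = text.splitlines()
--     for idx, line in enumerate(lines):
--         stripped = line.lstrip()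
--         # Fence open/close detection. Both ``` and ~~~ are markdown
--         # fences; we only see ``` in QPB's corpus, but supporting both
--         # is correct.
--         if stripped.startswith("```") or stripped.startswith("~~~"):
--             marker = "```" if stripped.startswith("```") else "~~~"
--             if not in_fence:
--                 in_fence = True
--                 fence_marker = marker
--             elif fence_marker == marker:
--                 in_fence = False
--                 fence_marker = None
--             continue
--         if in_fence:
--             continue
--         if line.startswith("## ") and not line.startswith("### "):
--             yield (idx, 2, line[3:].rstrip())
--         elif line.startswith("### "):
--             yield (idx, 3, line[4:].rstrip())
-- ===== SOURCE B (Python) =====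
-- def _skip_fenced(it, marker):
--     """Consume (idx, line) items from the shared iterator up to and including
--     the line that closes the fence opened with `marker`; an unclosed fence
--     consumes everything to EOF."""
--     for _idx, line in it:
--         t = line.lstrip()
--         if (t.startswith("```") or t.startswith("~~~")) and t[:3] == marker:
--             return
--
--
-- def _iter_top_level_headings(text):
--     it = enumerate(text.splitlines())
--     for idx, line in it:
--         s = line.lstrip()
--         if s.startswith("```") or s.startswith("~~~"):
--             _skip_fenced(it, s[:3])
--         elif line.startswith("### "):
--             yield (idx, 3, line[4:].rstrip())
--         elif line.startswith("## "):
--             yield (idx, 2, line[3:].rstrip())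
-- ===== Notes on version B (the rewrite author's own statement) =====
-- stated objective: alternative
-- what changed: Drops A's boolean/marker fence state machine entirely: B shares one iterator between the outer heading loop and a _skip_fenced helper that, on seeing a fence opener, consumes lines up to and including the matching close fence, so no in_fence flag is ever carried.
import Mathlib
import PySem

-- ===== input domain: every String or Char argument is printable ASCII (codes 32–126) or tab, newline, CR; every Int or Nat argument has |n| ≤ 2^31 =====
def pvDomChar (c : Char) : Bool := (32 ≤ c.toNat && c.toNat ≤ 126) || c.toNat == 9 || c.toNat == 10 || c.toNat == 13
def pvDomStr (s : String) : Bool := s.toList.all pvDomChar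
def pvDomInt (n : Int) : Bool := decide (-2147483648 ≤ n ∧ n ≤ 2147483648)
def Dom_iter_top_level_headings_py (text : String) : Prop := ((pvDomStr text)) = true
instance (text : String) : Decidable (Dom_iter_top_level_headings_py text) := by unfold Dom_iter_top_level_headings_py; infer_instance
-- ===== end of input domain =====

-- B replaces A's boolean/marker fence state machine by a fence-skipping consumer of a shared
-- iterator: no in_fence flag is carried; same cost, different algorithmic decomposition.

-- ===== PORT A =====
-- the for-loop of A over enumerate(lines), state (in_fence, fence_marker)
def pvLoopA : List (Int × String) → Bool → Option String → List (Int × Int × String)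
  | [], _, _ => []
  | (idx, line) :: rest, inFence, fenceMarker =>
    let stripped := PySem.Str.lstrip line
    if PySem.Str.startswith stripped "```" || PySem.Str.startswith stripped "~~~" then
      let marker := if PySem.Str.startswith stripped "```" then "```" else "~~~"
      if !inFence then pvLoopA rest true (some marker)
      else if fenceMarker == some marker then pvLoopA rest false none
      else pvLoopA rest inFence fenceMarker
    else if inFence then pvLoopA rest inFence fenceMarker
    else if PySem.Str.startswith line "## " && !(PySem.Str.startswith line "### ") then
      (idx, 2, PySem.Str.rstrip (PySem.Str.slice line (some 3) none)) :: pvLoopA rest inFence fenceMarker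
    else if PySem.Str.startswith line "### " then
      (idx, 3, PySem.Str.rstrip (PySem.Str.slice line (some 4) none)) :: pvLoopA rest inFence fenceMarker
    else pvLoopA rest inFence fenceMarker

def iter_top_level_headings_py (text : String) : List (Int × Int × String) :=
  pvLoopA (PySem.List.enumerate (PySem.Str.splitlines text) 0) false none

-- ===== PORT B =====
-- _skip_fenced: consume items up to and including the matching close fence;
-- the "shared iterator" is the list of remaining items, so the helper returns the remainder.
def pvSkipFenced (marker : String) : List (Int × String) → List (Int × String)
  | [] => []
  | (_, line) :: rest =>
    let t := PySem.Str.lstrip line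
    if (PySem.Str.startswith t "```" || PySem.Str.startswith t "~~~")
        && PySem.Str.slice t none (some 3) == marker then rest
    else pvSkipFenced marker rest

lemma pvSkipFenced_len (marker : String) (l : List (Int × String)) :
    (pvSkipFenced marker l).length ≤ l.length := by
  induction l with
  | nil => simp [pvSkipFenced]
  | cons hd rest ih =>
    obtain ⟨i, line⟩ := hd
    simp only [pvSkipFenced]
    split
    · simp
    · exact Nat.le_trans ih (by simp)

-- the outer for-loop of _iter_top_level_headings over the shared iterator
def pvGoB : List (Int × String) → List (Int × Int × String)
  | [] => []
  | (idx, line) :: rest =>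
    let s := PySem.Str.lstrip line
    if PySem.Str.startswith s "```" || PySem.Str.startswith s "~~~" then
      pvGoB (pvSkipFenced (PySem.Str.slice s none (some 3)) rest)
    else if PySem.Str.startswith line "### " then
      (idx, 3, PySem.Str.rstrip (PySem.Str.slice line (some 4) none)) :: pvGoB rest
    else if PySem.Str.startswith line "## " then
      (idx, 2, PySem.Str.rstrip (PySem.Str.slice line (some 3) none)) :: pvGoB rest
    else pvGoB rest
termination_by l => l.length
decreasing_by
  · exact Nat.lt_succ_of_le (pvSkipFenced_len _ _)
  · simp
  · simp
  · simp

def iter_top_level_headings_py_alt (text : String) : List (Int × Int × String) :=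
  pvGoB (PySem.List.enumerate (PySem.Str.splitlines text) 0)

-- ===== PRECONDITION & SPEC =====
def Spec_iter_top_level_headings_py (text : String) (out : List (Int × Int × String)) : Prop := out = iter_top_level_headings_py_alt text
instance (text : String) (out : List (Int × Int × String)) : Decidable (Spec_iter_top_level_headings_py text out) := by unfold Spec_iter_top_level_headings_py; infer_instance

-- ===== CLAIM (what is proved, stated in full; the proofs are below) =====
def Claim_equal_iter_top_level_headings_py : Prop := ∀ (text : String), Dom_iter_top_level_headings_py text → Spec_iter_top_level_headings_py text (iter_top_level_headings_py text)

-- ===== LEMMAS AND PROOFS =====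

-- a string starting with a 3-character prefix has that prefix as its [:3] slice
lemma pv_slice3_of_startswith (s p : String) (h3 : p.toList.length = 3)
    (h : PySem.Str.startswith s p = true) : PySem.Str.slice s none (some 3) = p := by
  have hpre : p.toList <+: s.toList := by
    rw [PySem.Str.startswith_eq, PySem.Chars.startswith_iff] at h
    exact h
  obtain ⟨t, ht⟩ := hpre
  have htake : s.toList.take 3 = p.toList := by
    rw [← ht, List.take_append_of_le_length (by omega), List.take_of_length_le (by omega)]
  have hlist : (PySem.Str.slice s none (some 3)).toList = p.toList := by
    have h30 : ((3 : Nat) : Int) = (3 : Int) := by norm_num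
    rw [PySem.Str.toList_slice, PySem.Chars.slice_eq_listSlice, ← h30,
      PySem.List.slice_to_natCast, htake]
  exact String.toList_injective hlist

-- A's loop in state (true, some m) equals B's loop run on the remainder after skipping the fence
lemma pv_main (n : Nat) (l : List (Int × String)) (hn : l.length ≤ n) :
    pvLoopA l false none = pvGoB l ∧
      ∀ m : String, pvLoopA l true (some m) = pvGoB (pvSkipFenced m l) := by
  induction n generalizing l with
  | zero =>
    have : l = [] := List.eq_nil_of_length_eq_zero (Nat.le_zero.mp hn)
    subst this
    exact ⟨by simp [pvLoopA, pvGoB], fun m => by simp [pvLoopA, pvSkipFenced, pvGoB]⟩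
  | succ n ih =>
    cases l with
    | nil => exact ⟨by simp [pvLoopA, pvGoB], fun m => by simp [pvLoopA, pvSkipFenced, pvGoB]⟩
    | cons hd rest =>
      obtain ⟨idx, line⟩ := hd
      have hrest : rest.length ≤ n := by simpa using hn
      obtain ⟨ihP, ihQ⟩ := ih rest hrest
      by_cases hf : (PySem.Str.startswith (PySem.Str.lstrip line) "```"
          || PySem.Str.startswith (PySem.Str.lstrip line) "~~~") = true
      · have hm : PySem.Str.slice (PySem.Str.lstrip line) none (some 3)
            = (if PySem.Str.startswith (PySem.Str.lstrip line) "```" then "```" else "~~~") := by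
          rcases (Bool.or_eq_true _ _).mp hf with h1 | h1
          · rw [if_pos h1]; exact pv_slice3_of_startswith _ _ (by decide) h1
          · by_cases h0 : PySem.Str.startswith (PySem.Str.lstrip line) "```" = true
            · rw [if_pos h0]; exact pv_slice3_of_startswith _ _ (by decide) h0
            · rw [if_neg h0]; exact pv_slice3_of_startswith _ _ (by decide) h1
        constructor
        · -- outside a fence: A opens the fence, B calls _skip_fenced
          simp only [pvLoopA, pvGoB, hf, if_pos, Bool.not_false, hm]
          simpa using
            ihQ (if PySem.Str.startswith (PySem.Str.lstrip line) "```" then "```" else "~~~")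
        · -- inside a fence with marker m
          intro m
          conv_lhs => rw [pvLoopA]
          conv_rhs => rw [pvSkipFenced]
          simp only [hf, Bool.not_true, Bool.false_eq_true, if_false, if_true, beq_iff_eq,
            Option.some.injEq, Bool.true_and, hm]
          by_cases he : m = (if PySem.Str.startswith (PySem.Str.lstrip line) "```" then "```" else "~~~")
          · simp only [he, if_true]
            exact ihP
          · rw [if_neg he, if_neg (fun h => he h.symm)]
            exact ihQ m
      · have hf' : (PySem.Str.startswith (PySem.Str.lstrip line) "```"
            || PySem.Str.startswith (PySem.Str.lstrip line) "~~~") = false := by simpa using hf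
        constructor
        · -- plain line outside a fence: heading branches (order differs, mutually exclusive)
          simp only [pvLoopA, pvGoB, hf', Bool.false_eq_true, if_false]
          rw [ihP]
          cases h3 : PySem.Str.startswith line "### " <;>
            cases h2 : PySem.Str.startswith line "## " <;>
              simp_all
        · -- plain line inside a fence: both skip it
          intro m
          conv_lhs => rw [pvLoopA]
          conv_rhs => rw [pvSkipFenced]
          simp only [hf', Bool.false_eq_true, if_false, Bool.false_and]
          exact ihQ m

-- ===== VERDICT (by name: the statement is the Claim_ definition above) =====
theorem iter_top_level_headings_py_spec : Claim_equal_iter_top_level_headings_py := by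
  intro text _
  show iter_top_level_headings_py text = iter_top_level_headings_py_alt text
  unfold iter_top_level_headings_py iter_top_level_headings_py_alt
  exact (pv_main _ _ le_rfl).1
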